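-- pv_equiv track=rewrite | github.com/cr3/adventofcode | adventofcode/year2022/day17.py | longest_common_rows
-- ===== SOURCE A (Python) =====
-- from itertools import cycle, takewhile
--
-- def longest_common_rows(rows: list[str]) -> tuple[int, int]:
--     result = (0, 0)
--     longest = 0
--     n = len(rows)
--     for i in range(n):
--         for j in range(i + 1, n):
--             length = len(
--                 list(
--                     takewhile(lambda x: x[0] == x[1], zip(rows[i:], rows[j:]))
--                 )
--             )
--             if length > longest:
--                 longest = length
--                 result = (i, j)
--
--     return result
-- ===== SOURCE B (Python) =====
-- def longest_common_rows(rows: list[str]) -> tuple[int, int]: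
--     # Quadratic DP: L[i][j] = matching-prefix run of suffixes i and j,
--     # filled backward from L[i+1][j+1]; then one forward scan for the
--     # first strict maximum, as in the original.
--     n = len(rows)
--     nxt = [0] * (n + 1)
--     table = [None] * n
--     for i in range(n - 1, -1, -1):
--         cur = [nxt[j + 1] + 1 if i < j and rows[i] == rows[j] else 0
--                for j in range(n)]
--         cur.append(0)
--         table[i] = cur
--         nxt = cur
--     result = (0, 0)
--     longest = 0
--     for i in range(n):
--         for j in range(i + 1, n):
--             if table[i][j] > longest:
--                 longest = table[i][j]
--                 result = (i, j)
--     return result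
-- ===== Notes on version B (the rewrite author's own statement) =====
-- stated objective: faster
-- what changed: Replaces the O(n) takewhile-over-suffix-pairs scan inside the double loop by a backward LCP-style dynamic-programming table L[i][j] = (rows[i]==rows[j] ? L[i+1][j+1]+1 : 0), then one forward scan for the first strict maximum.
import Mathlib
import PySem

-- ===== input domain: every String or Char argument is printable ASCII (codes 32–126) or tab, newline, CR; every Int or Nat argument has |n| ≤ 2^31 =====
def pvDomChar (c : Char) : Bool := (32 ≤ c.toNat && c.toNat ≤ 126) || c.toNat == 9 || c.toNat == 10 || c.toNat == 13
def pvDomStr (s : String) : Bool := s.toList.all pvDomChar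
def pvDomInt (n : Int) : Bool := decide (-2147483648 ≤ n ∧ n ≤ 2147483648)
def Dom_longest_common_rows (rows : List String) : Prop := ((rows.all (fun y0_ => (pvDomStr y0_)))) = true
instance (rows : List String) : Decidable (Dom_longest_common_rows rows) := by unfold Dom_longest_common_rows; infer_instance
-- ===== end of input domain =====

-- B replaces A's O(n) takewhile scan inside the double loop by a backward DP table
-- (L[i][j] = L[i+1][j+1]+1 when rows[i]=rows[j]), an asymptotically faster exact re-implementation.

-- ===== PORT A =====
-- for 0 ≤ i, Python's rows[i:] is rows.drop i; zip/takewhile/len are the Lean list functions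
def longest_common_rows (rows : List String) : Int × Int :=
  let n := rows.length
  ((List.range n).foldl (fun st i =>
      ((List.range n).drop (i + 1)).foldl (fun st j =>
        let length := (((rows.drop i).zip (rows.drop j)).takeWhile (fun x => x.1 == x.2)).length
        if length > st.2 then ((Int.ofNat i, Int.ofNat j), length) else st) st)
    (((0 : Int), (0 : Int)), (0 : Nat))).1

-- ===== PORT B =====
-- one DP row: the list comprehension [nxt[j+1]+1 if i<j and rows[i]==rows[j] else 0 for j in range(n)] + [0]
def pvRowB (rows : List String) (nxt : List Int) (i n : Nat) : List Int :=
  ((List.range n).map (fun j =>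
    if i < j ∧ rows.getD i "" = rows.getD j "" then nxt.getD (j + 1) 0 + 1 else 0)) ++ [0]

-- the backward loop 'for i in range(n-1, -1, -1)': after k iterations, fst = nxt, snd = table rows n-k .. n-1
def pvBuildB (rows : List String) (n : Nat) : Nat → List Int × List (List Int)
  | 0 => (List.replicate (n + 1) 0, [])
  | k + 1 =>
    let p := pvBuildB rows n k
    let cur := pvRowB rows p.1 (n - 1 - k) n
    (cur, cur :: p.2)

def longest_common_rows_alt (rows : List String) : Int × Int :=
  let n := rows.length
  let table := (pvBuildB rows n n).2
  ((List.range n).foldl (fun st i =>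
      ((List.range n).drop (i + 1)).foldl (fun st j =>
        let v := (table.getD i []).getD j 0
        if v > st.2 then ((Int.ofNat i, Int.ofNat j), v) else st) st)
    (((0 : Int), (0 : Int)), (0 : Int))).1

-- ===== PRECONDITION & SPEC =====
def Spec_longest_common_rows (rows : List String) (out : Int × Int) : Prop := out = longest_common_rows_alt rows
instance (rows : List String) (out : Int × Int) : Decidable (Spec_longest_common_rows rows out) := by unfold Spec_longest_common_rows; infer_instance

-- ===== CLAIM (what is proved, stated in full; the proofs are below) =====
def Claim_equal_longest_common_rows : Prop := ∀ (rows : List String), Dom_longest_common_rows rows → Spec_longest_common_rows rows (longest_common_rows rows)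

-- ===== LEMMAS AND PROOFS =====

-- length of the element-wise matching prefix of two suffixes
def pvRun : List String → List String → Nat
  | x :: xs, y :: ys => if x = y then pvRun xs ys + 1 else 0
  | _, _ => 0

lemma pvRun_nil_right (a : List String) : pvRun a [] = 0 := by
  cases a <;> simp [pvRun]

lemma takeWhile_zip_eq_run (a b : List String) :
    ((a.zip b).takeWhile (fun x => x.1 == x.2)).length = pvRun a b := by
  induction a generalizing b with
  | nil => cases b <;> simp [pvRun]
  | cons x xs ih =>
    cases b with
    | nil => simp [pvRun]
    | cons y ys =>
      by_cases h : x = y <;>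
        simp [pvRun, List.zip_cons_cons, h, ih]

-- the intended value of DP row i
def pvSpecRow (rows : List String) (n i : Nat) : List Int :=
  ((List.range n).map (fun j =>
    if i < j then ((pvRun (rows.drop i) (rows.drop j) : Nat) : Int) else 0)) ++ [0]

lemma getD_specRow (rows : List String) (n i k : Nat) (hk : k < n) :
    (pvSpecRow rows n i).getD k 0 =
      if i < k then ((pvRun (rows.drop i) (rows.drop k) : Nat) : Int) else 0 := by
  simp [pvSpecRow, List.getD, List.getElem?_append, hk]

lemma getD_specRow_n (rows : List String) (n i : Nat) :
    (pvSpecRow rows n i).getD n 0 = 0 := by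
  simp [pvSpecRow, List.getD]

lemma specRow_top (rows : List String) (n : Nat) :
    pvSpecRow rows n n = List.replicate (n + 1) 0 := by
  have h1 : (List.range n).map (fun j =>
      if n < j then ((pvRun (rows.drop n) (rows.drop j) : Nat) : Int) else 0)
      = (List.range n).map (fun _ => (0 : Int)) := by
    apply List.map_congr_left
    intro j hj
    have : j < n := List.mem_range.mp hj
    simp [Nat.not_lt.mpr (Nat.le_of_lt this)]
  simp [pvSpecRow, h1, List.map_const', List.replicate_succ']

lemma rowB_fun (rows : List String) (i j : Nat) (hi : i < rows.length) (hjn : j < rows.length) :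
    (if i < j ∧ rows.getD i "" = rows.getD j "" then
        (pvSpecRow rows rows.length (i + 1)).getD (j + 1) 0 + 1 else 0)
      = if i < j then ((pvRun (rows.drop i) (rows.drop j) : Nat) : Int) else 0 := by
  have hgi : rows.getD i "" = rows[i] := List.getD_eq_getElem rows "" hi
  have hgj : rows.getD j "" = rows[j] := List.getD_eq_getElem rows "" hjn
  by_cases hij : i < j
  · have hdi : rows.drop i = rows[i] :: rows.drop (i + 1) := List.drop_eq_getElem_cons hi
    have hdj : rows.drop j = rows[j] :: rows.drop (j + 1) := List.drop_eq_getElem_cons hjn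
    have hrun : pvRun (rows.drop i) (rows.drop j)
        = if rows[i] = rows[j] then pvRun (rows.drop (i + 1)) (rows.drop (j + 1)) + 1 else 0 := by
      rw [hdi, hdj]; rfl
    by_cases heq : rows[i] = rows[j]
    · have htail : (pvSpecRow rows rows.length (i + 1)).getD (j + 1) 0
          = ((pvRun (rows.drop (i + 1)) (rows.drop (j + 1)) : Nat) : Int) := by
        rcases Nat.lt_or_ge (j + 1) rows.length with h | h
        · rw [getD_specRow rows rows.length (i + 1) (j + 1) h]
          simp [Nat.succ_lt_succ hij]
        · have hjn' : j + 1 = rows.length := by omega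
          rw [hjn', getD_specRow_n]
          have hd : rows.drop rows.length = [] := by simp
          rw [hd, pvRun_nil_right]
          simp
      rw [if_pos ⟨hij, by rw [hgi, hgj]; exact heq⟩, if_pos hij, htail, hrun, if_pos heq]
      push_cast; ring
    · rw [if_neg (fun hc => heq (by rw [← hgi, ← hgj]; exact hc.2)), if_pos hij, hrun,
        if_neg heq]
      simp
  · rw [if_neg (fun hc => hij hc.1), if_neg hij]

lemma row_step (rows : List String) (i : Nat) (hi : i < rows.length) :
    pvRowB rows (pvSpecRow rows rows.length (i + 1)) i rows.length =
      pvSpecRow rows rows.length i := by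
  have h : (List.range rows.length).map (fun j =>
        if i < j ∧ rows.getD i "" = rows.getD j "" then
          (pvSpecRow rows rows.length (i + 1)).getD (j + 1) 0 + 1 else 0)
      = (List.range rows.length).map (fun j =>
        if i < j then ((pvRun (rows.drop i) (rows.drop j) : Nat) : Int) else 0) := by
    apply List.map_congr_left
    intro j hj
    exact rowB_fun rows i j hi (List.mem_range.mp hj)
  show ((List.range rows.length).map (fun j =>
        if i < j ∧ rows.getD i "" = rows.getD j "" then
          (pvSpecRow rows rows.length (i + 1)).getD (j + 1) 0 + 1 else 0)) ++ [0]
      = ((List.range rows.length).map (fun j =>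
        if i < j then ((pvRun (rows.drop i) (rows.drop j) : Nat) : Int) else 0)) ++ [0]
  rw [h]

lemma build_spec (rows : List String) (k : Nat) (hk : k ≤ rows.length) :
    (pvBuildB rows rows.length k).1 = pvSpecRow rows rows.length (rows.length - k) ∧
    (pvBuildB rows rows.length k).2
      = (List.range' (rows.length - k) k).map (pvSpecRow rows rows.length) := by
  induction k with
  | zero => simp [pvBuildB, specRow_top]
  | succ k ih =>
    obtain ⟨ih1, ih2⟩ := ih (Nat.le_of_succ_le hk)
    have hi : rows.length - 1 - k = rows.length - (k + 1) := by omega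
    have hi' : rows.length - (k + 1) < rows.length := by omega
    have hsucc : rows.length - (k + 1) + 1 = rows.length - k := by omega
    have hcur : pvRowB rows (pvBuildB rows rows.length k).1 (rows.length - 1 - k) rows.length
        = pvSpecRow rows rows.length (rows.length - (k + 1)) := by
      rw [ih1, hi, ← hsucc]
      exact row_step rows (rows.length - (k + 1)) hi'
    constructor
    · show pvRowB rows (pvBuildB rows rows.length k).1 (rows.length - 1 - k) rows.length = _
      exact hcur
    · show pvRowB rows (pvBuildB rows rows.length k).1 (rows.length - 1 - k) rows.length
          :: (pvBuildB rows rows.length k).2 = _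
      rw [hcur, ih2, List.range'_succ, hsucc]
      simp

lemma table_getD (rows : List String) (i : Nat) (hi : i < rows.length) :
    ((pvBuildB rows rows.length rows.length).2.getD i [])
      = pvSpecRow rows rows.length i := by
  have h := (build_spec rows rows.length (Nat.le_refl _)).2
  rw [Nat.sub_self] at h
  rw [h, ← List.range_eq_range']
  simp [List.getD, hi]

lemma table_value (rows : List String) (i j : Nat) (hij : i < j) (hj : j < rows.length) :
    (((pvBuildB rows rows.length rows.length).2.getD i []).getD j 0)
      = ((pvRun (rows.drop i) (rows.drop j) : Nat) : Int) := by
  rw [table_getD rows i (Nat.lt_trans hij hj), getD_specRow rows rows.length i j hj]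
  simp [hij]

lemma foldl_rel {α σ τ : Type} (R : σ → τ → Prop) (f : σ → α → σ) (g : τ → α → τ) :
    ∀ (l : List α) (s : σ) (t : τ),
      (∀ a ∈ l, ∀ s t, R s t → R (f s a) (g t a)) → R s t → R (l.foldl f s) (l.foldl g t) := by
  intro l
  induction l with
  | nil => intro s t _ h; exact h
  | cons a l ih =>
    intro s t hstep h
    exact ih _ _ (fun b hb => hstep b (List.mem_cons_of_mem a hb))
      (hstep a (List.mem_cons_self ..) s t h)

lemma mem_drop_range (n i j : Nat) (hj : j ∈ (List.range n).drop (i + 1)) :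
    i < j ∧ j < n := by
  rw [List.range_eq_range', List.drop_range'] at hj
  simp only [Nat.zero_add, Nat.mul_one] at hj
  rw [List.mem_range'] at hj
  obtain ⟨t, ht, rfl⟩ := hj
  omega

-- ===== VERDICT (by name: the statement is the Claim_ definition above) =====
theorem longest_common_rows_spec : Claim_equal_longest_common_rows := by
  intro rows _
  unfold Spec_longest_common_rows longest_common_rows longest_common_rows_alt
  have main := foldl_rel
    (R := fun (s : (Int × Int) × Nat) (t : (Int × Int) × Int) => t.1 = s.1 ∧ t.2 = (s.2 : Int))
    (f := fun st i =>
      ((List.range rows.length).drop (i + 1)).foldl (fun st j =>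
        let length := (((rows.drop i).zip (rows.drop j)).takeWhile (fun x => x.1 == x.2)).length
        if length > st.2 then ((Int.ofNat i, Int.ofNat j), length) else st) st)
    (g := fun st i =>
      ((List.range rows.length).drop (i + 1)).foldl (fun st j =>
        let v := (((pvBuildB rows rows.length rows.length).2.getD i []).getD j 0)
        if v > st.2 then ((Int.ofNat i, Int.ofNat j), v) else st) st)
    (List.range rows.length)
    (((0, 0), (0 : Nat))) (((0, 0), (0 : Int)))
    ?_ ⟨rfl, rfl⟩
  · exact main.1.symm
  · intro i hi s t hst
    have hin : i < rows.length := List.mem_range.mp hi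
    refine foldl_rel
      (R := fun (s : (Int × Int) × Nat) (t : (Int × Int) × Int) => t.1 = s.1 ∧ t.2 = (s.2 : Int))
      _ _ _ s t ?_ hst
    intro j hj s t hst
    obtain ⟨hij, hjn⟩ := mem_drop_range rows.length i j hj
    obtain ⟨h1, h2⟩ := hst
    simp only
    rw [table_value rows i j hij hjn, takeWhile_zip_eq_run]
    by_cases hgt : pvRun (rows.drop i) (rows.drop j) > s.2
    · have hgt' : ((pvRun (rows.drop i) (rows.drop j) : Nat) : Int) > t.2 := by
        rw [h2]; exact_mod_cast hgt
      simp [hgt, hgt']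
    · have hgt' : ¬ ((pvRun (rows.drop i) (rows.drop j) : Nat) : Int) > t.2 := by
        rw [h2]; exact_mod_cast hgt
      simp [hgt, h1, h2]
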